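-- pv_equiv track=rewrite | github.com/Red-Crossbones/TP-IntegradforP1 | lexi_old.py | es_nom_valido
-- ===== SOURCE A (Python) =====
-- def es_nom_valido(t):
--     ret = False
--     if len(t)==0:
--         ret=True
--     else:
--         if t[0].islower() or t[0].isnumeric():
--             ret = es_nom_valido(t[1:])
--     return ret
-- ===== SOURCE B (Python) =====
-- def es_nom_valido(t):
--     for c in t:
--         if not (c.islower() or c.isnumeric()):
--             return False
--     return True
-- ===== Notes on version B (the rewrite author's own statement) =====
-- stated objective: simpler
-- what changed: Replaces A's tail recursion on t[1:] (with a ret accumulator and repeated string slicing) by a single iterative for-loop with early return.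
import Mathlib
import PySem

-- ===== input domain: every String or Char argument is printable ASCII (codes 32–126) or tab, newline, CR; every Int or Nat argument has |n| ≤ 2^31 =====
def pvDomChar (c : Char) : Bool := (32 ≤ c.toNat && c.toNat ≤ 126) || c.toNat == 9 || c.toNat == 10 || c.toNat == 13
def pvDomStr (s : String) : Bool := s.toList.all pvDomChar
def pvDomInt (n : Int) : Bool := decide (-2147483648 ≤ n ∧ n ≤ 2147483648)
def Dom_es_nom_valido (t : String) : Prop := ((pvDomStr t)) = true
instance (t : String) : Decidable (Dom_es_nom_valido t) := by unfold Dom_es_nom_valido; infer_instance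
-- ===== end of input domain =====

-- B replaces A's tail recursion on t[1:] (ret accumulator, repeated slicing) by one iterative
-- for-loop with early return; return value is identical on the ASCII domain.

-- ===== PORT A =====
-- literal transliteration of A: length test, t[0] via pyGet?, recursion on the slice t[1:];
-- c.isnumeric() is ported as PySem.Chars.isdigit, exact on the printable-ASCII domain
def es_nom_valido_go (l : List Char) : Bool :=
  if l.length == 0 then true
  else
    match PySem.List.pyGet? l 0 with
    | none => false                      -- unreachable: l nonempty
    | some c =>
      if PySem.Chars.islower c || PySem.Chars.isdigit c then
        es_nom_valido_go (PySem.List.slice l (some 1) none)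
      else false
termination_by l.length
decreasing_by
  simp_all [PySem.List.slice_from_one]
  cases l with
  | nil => simp_all
  | cons a as => simp

def es_nom_valido (t : String) : Bool := es_nom_valido_go t.toList

-- ===== PORT B =====
-- the for-loop 'for c in t: if not (…): return False' as structural recursion over the chars
def es_nom_valido_alt_loop : List Char → Bool
  | [] => true
  | c :: cs =>
    if !(PySem.Chars.islower c || PySem.Chars.isdigit c) then false
    else es_nom_valido_alt_loop cs

def es_nom_valido_alt (t : String) : Bool := es_nom_valido_alt_loop t.toList

-- ===== PRECONDITION & SPEC =====
def Spec_es_nom_valido (t : String) (out : Bool) : Prop := out = es_nom_valido_alt t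
instance (t : String) (out : Bool) : Decidable (Spec_es_nom_valido t out) := by unfold Spec_es_nom_valido; infer_instance

-- ===== CLAIM (what is proved, stated in full; the proofs are below) =====
def Claim_equal_es_nom_valido : Prop := ∀ (t : String), Dom_es_nom_valido t → Spec_es_nom_valido t (es_nom_valido t)

-- ===== LEMMAS AND PROOFS =====
theorem es_nom_valido_go_eq_loop (l : List Char) : es_nom_valido_go l = es_nom_valido_alt_loop l := by
  induction l with
  | nil => simp [es_nom_valido_go, es_nom_valido_alt_loop]
  | cons c cs ih =>
    rw [es_nom_valido_go]
    simp [PySem.List.pyGet?, PySem.List.pyIdx?, PySem.List.slice_from_one,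
      es_nom_valido_alt_loop, ih]

-- ===== VERDICT (by name: the statement is the Claim_ definition above) =====
theorem es_nom_valido_spec : Claim_equal_es_nom_valido := by
  intro t _
  unfold Spec_es_nom_valido es_nom_valido es_nom_valido_alt
  exact es_nom_valido_go_eq_loop t.toList
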